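-- pv_equiv track=rewrite | github.com/kimkiogora/REFUNITE-Code-Challenge | src/index.py | get_relation
-- ===== SOURCE A (Python) =====
-- def get_relation(global_friends_list, names):
--     relation = []
--     for name in names:
--         for v in global_friends_list.keys():
--             if name in global_friends_list[v]:
--                 if v not in relation:
--                     relation.append(v)
--     return relation
-- ===== SOURCE B (Python) =====
-- def get_relation(global_friends_list, names):
--     # Build an inverted index: friend name -> list of owner keys (in key order).
--     owners = {}
--     for k, friends in global_friends_list.items():
--         for f in set(friends):
--             owners.setdefault(f, []).append(k)
--     seen = set()
--     relation = []
--     for name in names: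
--         for k in owners.get(name, []):
--             if k not in seen:
--                 seen.add(k)
--                 relation.append(k)
--     return relation
-- ===== Notes on version B (the rewrite author's own statement) =====
-- stated objective: faster
-- what changed: B precomputes an inverted index name->owner-keys once and walks it per queried name with a set for dedup, instead of A's rescan of every key's whole friend list for every name with a list membership test on the result.
import Mathlib
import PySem

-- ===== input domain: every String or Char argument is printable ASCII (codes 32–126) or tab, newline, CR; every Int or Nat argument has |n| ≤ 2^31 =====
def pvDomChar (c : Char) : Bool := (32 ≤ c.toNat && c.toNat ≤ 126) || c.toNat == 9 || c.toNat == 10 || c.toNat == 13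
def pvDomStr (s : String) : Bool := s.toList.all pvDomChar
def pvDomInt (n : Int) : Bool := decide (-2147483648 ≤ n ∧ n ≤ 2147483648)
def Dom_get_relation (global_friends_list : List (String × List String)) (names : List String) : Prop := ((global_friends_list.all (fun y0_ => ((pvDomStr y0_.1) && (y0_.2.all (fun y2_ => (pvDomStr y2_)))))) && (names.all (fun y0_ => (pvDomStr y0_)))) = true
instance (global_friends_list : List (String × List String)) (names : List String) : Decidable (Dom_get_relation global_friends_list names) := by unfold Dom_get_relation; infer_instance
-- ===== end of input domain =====

-- B replaces A's per-name rescan of every key's friend list by a precomputed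
-- inverted index name → owner keys plus a set for dedup (objective: faster).

-- ===== PORT A =====
def get_relation (global_friends_list : List (String × List String)) (names : List String) : List String :=
  let d := PySem.Dict.ofList global_friends_list
  names.foldl (fun relation name =>
    d.keys.foldl (fun relation v =>
      if name ∈ d.getD v [] then
        (if v ∈ relation then relation else relation ++ [v])
      else relation) relation) []

-- ===== PORT B =====
-- owners = {}; for k, friends in d.items(): for f in set(friends): owners.setdefault(f, []).append(k)
def grOwners (items : List (String × List String)) : PySem.Dict String (List String) :=
  items.foldl (fun ow p =>
    (PySem.Set.ofList p.2).foldl (fun ow f => ow.modify f [] (· ++ [p.1])) ow)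
    PySem.Dict.empty

def get_relation_alt (global_friends_list : List (String × List String)) (names : List String) : List String :=
  let d := PySem.Dict.ofList global_friends_list
  let owners := grOwners d.items
  (names.foldl (fun (st : PySem.Set String × List String) name =>
      (owners.getD name []).foldl (fun st k =>
        if PySem.Set.contains st.1 k then st
        else (PySem.Set.add st.1 k, st.2 ++ [k])) st)
    (PySem.Set.empty, [])).2

-- ===== PRECONDITION & SPEC =====
def Spec_get_relation (global_friends_list : List (String × List String)) (names : List String) (out : List String) : Prop := out = get_relation_alt global_friends_list names
instance (global_friends_list : List (String × List String)) (names : List String) (out : List String) : Decidable (Spec_get_relation global_friends_list names out) := by unfold Spec_get_relation; infer_instance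

-- ===== CLAIM (what is proved, stated in full; the proofs are below) =====
def Claim_equal_get_relation : Prop := ∀ (global_friends_list : List (String × List String)) (names : List String), Dom_get_relation global_friends_list names → Spec_get_relation global_friends_list names (get_relation global_friends_list names)

-- ===== LEMMAS AND PROOFS =====

-- effect of the inner 'for f in set(friends)' loop on one lookup
lemma grOwners_inner (k : String) :
    ∀ (s : List String), s.Nodup →
    ∀ (ow : PySem.Dict String (List String)) (name : String),
      (s.foldl (fun ow f => ow.modify f [] (· ++ [k])) ow).getD name []
        = if name ∈ s then ow.getD name [] ++ [k] else ow.getD name [] := by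
  intro s
  induction s with
  | nil => intro _ ow name; simp
  | cons f s' ih =>
    intro hs ow name
    rcases List.nodup_cons.mp hs with ⟨hf, hs'⟩
    simp only [List.foldl_cons]
    rw [ih hs']
    by_cases hnf : name = f
    · subst hnf
      simp [hf, PySem.Dict.getD_modify_self]
    · simp [PySem.Dict.getD_modify, hnf]

-- the index fold from any start, per name: appends exactly the owners in item order
lemma grOwners_fold (items : List (String × List String)) :
    ∀ (ow : PySem.Dict String (List String)) (name : String),
      (items.foldl (fun ow p =>
          (PySem.Set.ofList p.2).foldl (fun ow f => ow.modify f [] (· ++ [p.1])) ow) ow).getD name []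
        = ow.getD name [] ++ (items.filter (fun p => decide (name ∈ p.2))).map (·.1) := by
  induction items with
  | nil => intro ow name; simp
  | cons p rest ih =>
    intro ow name
    simp only [List.foldl_cons, List.filter_cons]
    rw [ih, grOwners_inner p.1 _ (PySem.Set.nodup_ofList _) ow name]
    by_cases h : name ∈ p.2
    · simp [h, PySem.Set.mem_ofList]
    · simp [h, PySem.Set.mem_ofList]

-- the inverted index holds, per name, exactly the owners in item order
lemma grOwners_getD (items : List (String × List String)) (name : String) :
    (grOwners items).getD name []
      = (items.filter (fun p => decide (name ∈ p.2))).map (·.1) := by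
  unfold grOwners
  rw [grOwners_fold]
  simp

-- B's inner loop (seen-set + result list) equals A's dedup-append loop, under
-- the invariant that 'seen' has exactly the members of 'relation'
lemma inner_fold_eq (L : List String) :
    ∀ (seen rel : List String), (∀ x, x ∈ seen ↔ x ∈ rel) →
      (L.foldl (fun (st : PySem.Set String × List String) k =>
          if PySem.Set.contains st.1 k then st
          else (PySem.Set.add st.1 k, st.2 ++ [k])) (seen, rel)).2
        = L.foldl (fun rel v => if v ∈ rel then rel else rel ++ [v]) rel
      ∧ (∀ x, x ∈ (L.foldl (fun (st : PySem.Set String × List String) k =>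
          if PySem.Set.contains st.1 k then st
          else (PySem.Set.add st.1 k, st.2 ++ [k])) (seen, rel)).1 ↔
            x ∈ (L.foldl (fun (st : PySem.Set String × List String) k =>
          if PySem.Set.contains st.1 k then st
          else (PySem.Set.add st.1 k, st.2 ++ [k])) (seen, rel)).2) := by
  induction L with
  | nil => intro seen rel h; exact ⟨rfl, h⟩
  | cons k L' ih =>
    intro seen rel h
    by_cases hk : k ∈ rel
    · have hc : PySem.Set.contains seen k = true := (PySem.Set.contains_iff _ _).mpr ((h k).mpr hk)
      simp only [List.foldl_cons, hc, hk, if_pos]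
      exact ih seen rel h
    · have hc : PySem.Set.contains seen k = false := by
        rw [Bool.eq_false_iff, Ne, PySem.Set.contains_iff _ _]
        exact fun hm => hk ((h k).mp hm)
      simp only [List.foldl_cons, hc, Bool.false_eq_true, if_false, hk]
      refine ih _ _ ?_
      intro x
      rw [PySem.Set.mem_add, List.mem_append, List.mem_singleton, h x]

-- A's guarded scan over the keys is the scan over the index entry for that name
lemma inner_A_eq (d : PySem.Dict String (List String)) (hnd : d.keys.Nodup)
    (name : String) (rel : List String) :
    d.keys.foldl (fun relation v =>
        if name ∈ d.getD v [] then
          (if v ∈ relation then relation else relation ++ [v])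
        else relation) rel
      = ((grOwners d.items).getD name []).foldl
          (fun rel v => if v ∈ rel then rel else rel ++ [v]) rel := by
  rw [grOwners_getD, PySem.Dict.items_eq_map_keys d hnd [],
      List.filter_map, List.map_map]
  have hmap : List.map ((fun (x : String × List String) => x.1) ∘ fun k => (k, d.getD k []))
      (List.filter ((fun (p : String × List String) => decide (name ∈ p.2)) ∘ fun k => (k, d.getD k [])) d.keys)
      = List.filter (fun v => decide (name ∈ d.getD v [])) d.keys := by
    simp [Function.comp_def]
  rw [hmap, List.foldl_filter]
  simp

-- the whole loop over names, with the invariant threaded through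
lemma main_fold (d : PySem.Dict String (List String)) (hnd : d.keys.Nodup)
    (names : List String) :
    ∀ (seen rel : List String), (∀ x, x ∈ seen ↔ x ∈ rel) →
      names.foldl (fun relation name =>
          d.keys.foldl (fun relation v =>
            if name ∈ d.getD v [] then
              (if v ∈ relation then relation else relation ++ [v])
            else relation) relation) rel
        = (names.foldl (fun (st : PySem.Set String × List String) name =>
            ((grOwners d.items).getD name []).foldl (fun st k =>
              if PySem.Set.contains st.1 k then st
              else (PySem.Set.add st.1 k, st.2 ++ [k])) st) (seen, rel)).2 := by
  induction names with
  | nil => intro seen rel _; rfl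
  | cons name names' ih =>
    intro seen rel h
    simp only [List.foldl_cons]
    obtain ⟨h1, h2⟩ := inner_fold_eq ((grOwners d.items).getD name []) seen rel h
    set st' := ((grOwners d.items).getD name []).foldl (fun (st : PySem.Set String × List String) k =>
          if PySem.Set.contains st.1 k then st
          else (PySem.Set.add st.1 k, st.2 ++ [k])) (seen, rel) with hst
    rw [inner_A_eq d hnd name rel, ← h1]
    have := ih st'.1 st'.2 h2
    simpa using this

-- ===== VERDICT (by name: the statement is the Claim_ definition above) =====
theorem get_relation_spec : Claim_equal_get_relation := by
  intro gfl names _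
  unfold Spec_get_relation get_relation get_relation_alt
  exact main_fold _ (PySem.Dict.nodup_keys_ofList gfl) names [] [] (fun x => Iff.rfl)
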